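-- pv_equiv track=rewrite | github.com/LRSORRENTI/Advent-Of-Code-2024 | 22_Monkey-Market/02_part-two.py | find_first_occurrences
-- ===== SOURCE A (Python) =====
-- def find_first_occurrences(prices: list[int]) -> dict[tuple[int,int,int,int], int]:
--     """
--     Given a buyer's sequence of prices (length 2001),
--     compute the 2000 consecutive changes and find the
--     earliest occurrence of each 4-change pattern.
--
--     Returns a dictionary:
--       pattern_of_4_changes -> earliest index i
--     meaning the earliest index where that pattern starts.
--     """
--     earliest = {}
--     # Generate the changes (length = len(prices) - 1)
--     changes = []
--     for i in range(len(prices) - 1):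
--         changes.append(prices[i+1] - prices[i])  # difference in ones digits
--
--     # For each sliding window of size 4 in changes
--     for i in range(len(changes) - 3):
--         pattern = (changes[i], changes[i+1], changes[i+2], changes[i+3])
--         if pattern not in earliest:
--             earliest[pattern] = i
--
--     return earliest
-- ===== SOURCE B (Python) =====
-- def find_first_occurrences(prices: list[int]) -> dict[tuple[int,int,int,int], int]:
--     """One pass over prices: keep only the last four changes as a rolling
--     window; when the window is full, record the earliest start index."""
--     earliest = {}
--     w = ()
--     for i in range(len(prices) - 1):
--         w = (w + (prices[i+1] - prices[i],))[-4:]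
--         if len(w) == 4:
--             earliest.setdefault(w, i - 3)
--     return earliest
-- ===== Notes on version B (the rewrite author's own statement) =====
-- stated objective: alternative
-- what changed: Build-then-scan (materialize the full changes list, then a second indexed loop over all size-4 windows) is replaced by a single pass over prices that maintains only a 4-element rolling window of the last changes and records each full window with dict.setdefault.
import Mathlib
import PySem

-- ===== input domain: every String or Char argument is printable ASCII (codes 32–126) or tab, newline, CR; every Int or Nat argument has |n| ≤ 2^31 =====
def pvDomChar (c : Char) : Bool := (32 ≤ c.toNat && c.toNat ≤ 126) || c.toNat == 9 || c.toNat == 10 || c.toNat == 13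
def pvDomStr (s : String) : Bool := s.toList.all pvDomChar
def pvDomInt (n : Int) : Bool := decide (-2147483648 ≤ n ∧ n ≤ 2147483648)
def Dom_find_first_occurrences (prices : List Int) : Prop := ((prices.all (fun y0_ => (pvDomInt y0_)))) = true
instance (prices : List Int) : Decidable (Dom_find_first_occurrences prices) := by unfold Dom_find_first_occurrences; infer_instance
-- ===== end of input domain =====

-- B replaces A's build-then-scan (full changes list, then a second indexed window loop) by a
-- single pass keeping only a 4-element rolling window of the last changes (objective: alternative).

-- Shared type-convention helper: flatten ((a,b,c,d), i) dict items to the required output tuple.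
def pvFlat (p : (Int × Int × Int × Int) × Int) : Int × Int × Int × Int × Int :=
  (p.1.1, p.1.2.1, p.1.2.2.1, p.1.2.2.2, p.2)

-- ===== PORT A =====
-- loop body of A's second loop: pattern = (changes[i..i+3]); if pattern not in earliest: earliest[pattern] = i
def pvStepA (changes : List Int) (d : PySem.Dict (Int × Int × Int × Int) Int) (i : Int) :
    PySem.Dict (Int × Int × Int × Int) Int :=
  let pattern := (PySem.List.pyGetD changes i 0, PySem.List.pyGetD changes (i+1) 0,
                  PySem.List.pyGetD changes (i+2) 0, PySem.List.pyGetD changes (i+3) 0)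
  if d.contains pattern then d else d.insert pattern i

def find_first_occurrences (prices : List Int) : List (Int × Int × Int × Int × Int) :=
  -- changes: for i in range(len(prices)-1): changes.append(prices[i+1]-prices[i])  (indices always in range)
  let changes := (PySem.List.pyRange 0 ((prices.length : Int) - 1) 1).foldl
      (fun ch i => ch ++ [PySem.List.pyGetD prices (i+1) 0 - PySem.List.pyGetD prices i 0]) []
  let earliest := (PySem.List.pyRange 0 ((changes.length : Int) - 3) 1).foldl
      (pvStepA changes) PySem.Dict.empty
  earliest.items.map pvFlat

-- ===== PORT B =====
-- 'if len(w) == 4: earliest.setdefault(w, i-3)': length test merged with tuple destructuring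
def pvKeyed (w : List Int) (d : PySem.Dict (Int × Int × Int × Int) Int) (v : Int) :
    PySem.Dict (Int × Int × Int × Int) Int :=
  match w with
  | [a, b, c, e] => d.setdefault (a, b, c, e) v
  | _ => d

-- loop body of B: w = (w + (diff,))[-4:]; if len(w)==4: earliest.setdefault(w, i-3)
-- (w[-4:] on a list of known length is exactly drop (length - 4))
def pvStepB (prices : List Int) (s : List Int × PySem.Dict (Int × Int × Int × Int) Int) (i : Int) :
    List Int × PySem.Dict (Int × Int × Int × Int) Int :=
  let w1 := s.1 ++ [PySem.List.pyGetD prices (i+1) 0 - PySem.List.pyGetD prices i 0]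
  let w2 := w1.drop (w1.length - 4)
  (w2, pvKeyed w2 s.2 (i - 3))

def find_first_occurrences_alt (prices : List Int) : List (Int × Int × Int × Int × Int) :=
  (((PySem.List.pyRange 0 ((prices.length : Int) - 1) 1).foldl (pvStepB prices)
      ([], PySem.Dict.empty)).2).items.map pvFlat

-- ===== PRECONDITION & SPEC =====
def Spec_find_first_occurrences (prices : List Int) (out : List (Int × Int × Int × Int × Int)) : Prop := out = find_first_occurrences_alt prices
instance (prices : List Int) (out : List (Int × Int × Int × Int × Int)) : Decidable (Spec_find_first_occurrences prices out) := by unfold Spec_find_first_occurrences; infer_instance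

-- ===== CLAIM (what is proved, stated in full; the proofs are below) =====
def Claim_equal_find_first_occurrences : Prop := ∀ (prices : List Int), Dom_find_first_occurrences prices → Spec_find_first_occurrences prices (find_first_occurrences prices)

-- ===== LEMMAS AND PROOFS =====

-- the changes list A materializes, as a map over the index range
def pvChanges (prices : List Int) : List Int :=
  (PySem.List.pyRange 0 ((prices.length : Int) - 1) 1).map
    (fun i => PySem.List.pyGetD prices (i+1) 0 - PySem.List.pyGetD prices i 0)

theorem pvChanges_get (prices : List Int) (n : Nat) (hn : n < (pvChanges prices).length) :
    (pvChanges prices)[n] =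
      PySem.List.pyGetD prices ((n : Int) + 1) 0 - PySem.List.pyGetD prices (n : Int) 0 := by
  unfold pvChanges at hn ⊢
  rw [List.getElem_map, PySem.List.getElem_pyRange_one]
  simp

theorem pvKeyed_ne (w : List Int) (d : PySem.Dict (Int × Int × Int × Int) Int) (v : Int)
    (h : w.length ≠ 4) : pvKeyed w d v = d := by
  unfold pvKeyed
  split
  · simp at h
  · rfl

theorem pv_inv (prices : List Int) (n : Nat) (hn : n ≤ (pvChanges prices).length) :
    (PySem.List.pyRange 0 (n : Int) 1).foldl (pvStepB prices) ([], PySem.Dict.empty)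
    = (((pvChanges prices).take n).drop (n - 4),
       (PySem.List.pyRange 0 ((n : Int) - 3) 1).foldl (pvStepA (pvChanges prices))
         PySem.Dict.empty) := by
  induction n with
  | zero =>
      rw [PySem.List.pyRange_one_eq_nil (by omega), PySem.List.pyRange_one_eq_nil (by omega)]
      simp
  | succ n ih =>
      set cs := pvChanges prices with hcs
      have hlt : n < cs.length := by omega
      have hrange : PySem.List.pyRange 0 ((n + 1 : Nat) : Int) 1
          = PySem.List.pyRange 0 (n : Int) 1 ++ [(n : Int)] := by
        push_cast
        exact PySem.List.pyRange_one_succ_right (by omega)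
      rw [hrange, List.foldl_append, ih (by omega)]
      -- compute the single B step
      have hdiff : PySem.List.pyGetD prices ((n : Int) + 1) 0 - PySem.List.pyGetD prices (n : Int) 0
          = cs[n] := (pvChanges_get prices n hlt).symm
      have htake : cs.take (n + 1) = cs.take n ++ [cs[n]] := by
        rw [List.take_add_one, List.getElem?_eq_getElem hlt]; rfl
      have hw1 : (cs.take n).drop (n - 4) ++ [cs[n]] = (cs.take (n + 1)).drop (n - 4) := by
        rw [htake, List.drop_append_of_le_length (by simp; omega)]
      have hlen1 : ((cs.take (n + 1)).drop (n - 4)).length = (n + 1) - (n - 4) := by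
        simp; omega
      have hw2 : ∀ k, ((cs.take (n + 1)).drop (n - 4)).drop k
          = (cs.take (n + 1)).drop ((n - 4) + k) := fun k => List.drop_drop ..
      simp only [List.foldl_cons, List.foldl_nil, pvStepB, hdiff, hw1, hlen1, hw2]
      have harith : (n - 4) + ((n + 1) - (n - 4) - 4) = (n + 1) - 4 := by omega
      rw [harith]
      by_cases h3 : 3 ≤ n
      · -- the window is full: [cs[n-3], cs[n-2], cs[n-1], cs[n]]
        have hwin : (cs.take (n + 1)).drop ((n + 1) - 4)
            = [cs[n-3], cs[n-2], cs[n-1], cs[n]] := by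
          have hl : (cs.take (n + 1)).length = n + 1 := by simp; omega
          have g : ∀ j (hj : j < n + 1), (cs.take (n+1))[j]'(by omega) = cs[j]'(by omega) :=
            fun j hj => List.getElem_take ..
          rw [List.drop_eq_getElem_cons (by omega), List.drop_eq_getElem_cons (by omega),
              List.drop_eq_getElem_cons (by omega), List.drop_eq_getElem_cons (by omega),
              List.drop_eq_nil_of_le (by omega)]
          have e0 : (n+1) - 4 = n - 3 := by omega
          have f1 : n - 3 + 1 = n - 2 := by omega
          have f2 : n - 2 + 1 = n - 1 := by omega
          have f3 : n - 1 + 1 = n := by omega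
          simp only [e0, f1, f2, f3, List.getElem_take]
        rw [hwin]
        have hrangeA : PySem.List.pyRange 0 (((n + 1 : Nat) : Int) - 3) 1
            = PySem.List.pyRange 0 ((n : Int) - 3) 1 ++ [(n : Int) - 3] := by
          have : ((n + 1 : Nat) : Int) - 3 = ((n : Int) - 3) + 1 := by push_cast; ring
          rw [this]
          exact PySem.List.pyRange_one_succ_right (by omega)
        rw [hrangeA, List.foldl_append]
        set D := (PySem.List.pyRange 0 ((n : Int) - 3) 1).foldl (pvStepA cs) PySem.Dict.empty
        have c1 : ((n : Int) - 3 + 1) = ((n - 2 : Nat) : Int) := by omega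
        have c2 : ((n : Int) - 3 + 2) = ((n - 1 : Nat) : Int) := by omega
        have c3 : ((n : Int) - 3 + 3) = ((n : Nat) : Int) := by omega
        have c0 : ((n : Int) - 3) = ((n - 3 : Nat) : Int) := by omega
        have gd : ∀ (j : Nat) (hj : j < cs.length), PySem.List.pyGetD cs ((j : Nat) : Int) 0 = cs[j]'hj := by
          intro j hj
          rw [PySem.List.pyGetD_natCast, List.getD_eq_getElem cs 0 hj]
        simp only [List.foldl_cons, List.foldl_nil, Prod.mk.injEq, true_and]
        simp only [pvKeyed, pvStepA]
        rw [c1, c2, c3, c0, gd (n-3) (by omega), gd (n-2) (by omega), gd (n-1) (by omega),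
            gd n (by omega)]
        by_cases hc : D.contains (cs[n-3], cs[n-2], cs[n-1], cs[n]) = true
        · rw [PySem.Dict.setdefault_of_contains D _ hc, if_pos hc]
        · rw [PySem.Dict.setdefault_of_not_contains D _ (by simpa using hc), if_neg hc]
      · -- window not yet full: dict unchanged, both dict-fold ranges are empty
        rw [pvKeyed_ne _ _ _ (by simp; omega),
            PySem.List.pyRange_one_eq_nil (a := 0) (b := ((n + 1 : Nat) : Int) - 3) (by push_cast; omega),
            PySem.List.pyRange_one_eq_nil (a := 0) (b := (n : Int) - 3) (by omega)]

theorem pv_changes_eq (prices : List Int) :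
    (PySem.List.pyRange 0 ((prices.length : Int) - 1) 1).foldl
      (fun ch i => ch ++ [PySem.List.pyGetD prices (i+1) 0 - PySem.List.pyGetD prices i 0]) []
    = pvChanges prices := by
  rw [PySem.List.foldl_append_singleton_eq_map]
  rfl

-- ===== VERDICT (by name: the statement is the Claim_ definition above) =====
theorem find_first_occurrences_spec : Claim_equal_find_first_occurrences := by
  intro prices _
  unfold Spec_find_first_occurrences find_first_occurrences find_first_occurrences_alt
  rw [pv_changes_eq]
  rcases prices with _ | ⟨p, ps⟩
  · decide
  · set prices := p :: ps with hp
    have hlen : 1 ≤ prices.length := by simp [hp]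
    have hm : ((pvChanges prices).length : Int) = (prices.length : Int) - 1 := by
      unfold pvChanges
      simp [PySem.List.length_pyRange_one]
      omega
    have hB : (prices.length : Int) - 1 = (((pvChanges prices).length : Nat) : Int) := hm.symm
    rw [hB, pv_inv prices (pvChanges prices).length (le_refl _)]
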